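-- pv_equiv track=rewrite | github.com/pratu16x7/kaleidoscope | solver/puzzle.py | get_hori_cell_gradients
-- ===== SOURCE A (Python) =====
-- WINDOW_DIMS = {
--   'h': [2, 3],
--   'v': [3, 2],
--   'lh': [1, 4],
--   'lv': [1, 4],
--   'sh': []
-- }
--
-- def get_hori_cell_gradients(cell_grid, h, w):
--   hori_cell_2_grads = []
--   hori_cell_3_grads = []
--
--   for i in range(h - WINDOW_DIMS['h'][0] + 1):
--     grad_2_row = []
--     grad_3_row = [] if i < h - WINDOW_DIMS['h'][0] else None
--
--     for j in range(w):
--       sum_2 = cell_grid[i][j] + cell_grid[i+1][j]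
--       grad_2_row.append(sum_2)
--
--       if type(grad_3_row) is list:
--         sum_3 = sum_2 + cell_grid[i+2][j]
--         grad_3_row.append(sum_3)
--
--     hori_cell_2_grads.append(grad_2_row)
--
--     if type(grad_3_row) is list:
--       hori_cell_3_grads.append(grad_3_row)
--
--   return hori_cell_2_grads, hori_cell_3_grads
-- ===== SOURCE B (Python) =====
-- def get_hori_cell_gradients(cell_grid, h, w):
--   # Prefix-sum algorithm: running column sums pref[i][j] = sum of cell_grid[0..i-1][j];
--   # each window sum is then a difference of two prefix rows.
--   if h < 2:
--     return [], []
--   pref = [[0] * w]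
--   for row in cell_grid[:h]:
--     pref.append([p + x for p, x in zip(pref[-1], row)])
--   grads2 = [[pref[i + 2][j] - pref[i][j] for j in range(w)] for i in range(h - 1)]
--   grads3 = [[pref[i + 3][j] - pref[i][j] for j in range(w)] for i in range(h - 2)]
--   return grads2, grads3
-- ===== Notes on version B (the rewrite author's own statement) =====
-- stated objective: alternative
-- what changed: Replaced direct window summation by a prefix-sum algorithm: one pass builds running column sums pref[i][j] = sum of rows 0..i-1, and every 2-row and 3-row window sum is then obtained as a difference pref[i+k][j] - pref[i][j] instead of adding cells.
import Mathlib
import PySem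

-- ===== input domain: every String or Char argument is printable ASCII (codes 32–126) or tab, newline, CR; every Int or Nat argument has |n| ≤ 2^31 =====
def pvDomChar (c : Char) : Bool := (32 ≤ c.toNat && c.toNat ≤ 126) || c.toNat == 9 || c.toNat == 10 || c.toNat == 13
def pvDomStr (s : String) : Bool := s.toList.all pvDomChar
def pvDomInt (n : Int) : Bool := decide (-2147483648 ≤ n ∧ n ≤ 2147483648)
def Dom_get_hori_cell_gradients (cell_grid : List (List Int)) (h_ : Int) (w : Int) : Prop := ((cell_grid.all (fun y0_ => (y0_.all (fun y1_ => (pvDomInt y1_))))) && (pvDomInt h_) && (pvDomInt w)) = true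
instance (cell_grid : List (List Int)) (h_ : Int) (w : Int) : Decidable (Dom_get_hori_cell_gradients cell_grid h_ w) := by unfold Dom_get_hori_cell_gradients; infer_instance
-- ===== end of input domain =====

-- B replaces A's direct window summation by a prefix-sum algorithm: running column sums are
-- built once, and every window sum is a difference of two prefix rows (alternative algorithm).

-- cell_grid[i][j] (under Pre_ all indices taken are in range, so the defaults are never used)
def pvCell (cg : List (List Int)) (i j : Int) : Int :=
  PySem.List.pyGetD (PySem.List.pyGetD cg i []) j 0

-- ===== PORT A =====
-- WINDOW_DIMS['h'][0] = 2 is a module constant; the lookup is transliterated as the literal 2.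
def get_hori_cell_gradients (cell_grid : List (List Int)) (h_ : Int) (w : Int) : List (List Int) × List (List Int) :=
  (PySem.List.pyRange 0 (h_ - 2 + 1) 1).foldl (fun acc i =>
    let st := (PySem.List.pyRange 0 w 1).foldl (fun st j =>
        let sum_2 := pvCell cell_grid i j + pvCell cell_grid (i+1) j
        (st.1 ++ [sum_2],
         match st.2 with
         | some g3 => some (g3 ++ [sum_2 + pvCell cell_grid (i+2) j])
         | none => none))
      (([] : List Int), if i < h_ - 2 then some ([] : List Int) else none)
    (acc.1 ++ [st.1],
     match st.2 with
     | some g3 => acc.2 ++ [g3]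
     | none => acc.2))
    (([] : List (List Int)), ([] : List (List Int)))

-- ===== PORT B =====
-- pref[-1] is PySem.List.pyGetD pref (-1) []; [0]*w is List.replicate w.toNat 0 ([]*negative = []);
-- [p + x for p, x in zip(a, b)] is List.zipWith (·+·) a b.
def get_hori_cell_gradients_alt (cell_grid : List (List Int)) (h_ : Int) (w : Int) : List (List Int) × List (List Int) :=
  if h_ < 2 then ([], []) else
  let pref := (PySem.List.slice cell_grid none (some h_)).foldl
    (fun pref row => pref ++ [List.zipWith (· + ·) (PySem.List.pyGetD pref (-1) ([] : List Int)) row])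
    [List.replicate w.toNat 0]
  let grads2 := (PySem.List.pyRange 0 (h_ - 1) 1).map (fun i =>
    (PySem.List.pyRange 0 w 1).map (fun j =>
      PySem.List.pyGetD (PySem.List.pyGetD pref (i+2) []) j 0
        - PySem.List.pyGetD (PySem.List.pyGetD pref i []) j 0))
  let grads3 := (PySem.List.pyRange 0 (h_ - 2) 1).map (fun i =>
    (PySem.List.pyRange 0 w 1).map (fun j =>
      PySem.List.pyGetD (PySem.List.pyGetD pref (i+3) []) j 0
        - PySem.List.pyGetD (PySem.List.pyGetD pref i []) j 0))
  (grads2, grads3)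

-- ===== PRECONDITION & SPEC =====
-- Pre_ excludes exactly the inputs where A raises IndexError: h ≥ 2 and w ≥ 1 with the grid
-- missing one of the first h rows or one of those rows shorter than w.
def Pre_get_hori_cell_gradients (cell_grid : List (List Int)) (h_ : Int) (w : Int) : Prop :=
  h_ ≤ 1 ∨ w ≤ 0 ∨ (h_ ≤ (cell_grid.length : Int) ∧ ∀ r ∈ cell_grid.take h_.toNat, w ≤ (r.length : Int))
instance (cell_grid : List (List Int)) (h_ : Int) (w : Int) : Decidable (Pre_get_hori_cell_gradients cell_grid h_ w) := by unfold Pre_get_hori_cell_gradients; infer_instance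

def pvWitness_get_hori_cell_gradients : List (List Int) × Int × Int := ([[1,2],[3,4],[5,6]], 3, 2)

def Spec_get_hori_cell_gradients (cell_grid : List (List Int)) (h_ : Int) (w : Int) (out : List (List Int) × List (List Int)) : Prop := out = get_hori_cell_gradients_alt cell_grid h_ w
instance (cell_grid : List (List Int)) (h_ : Int) (w : Int) (out : List (List Int) × List (List Int)) : Decidable (Spec_get_hori_cell_gradients cell_grid h_ w out) := by unfold Spec_get_hori_cell_gradients; infer_instance

-- ===== CLAIM (what is proved, stated in full; the proofs are below) =====
def Claim_equal_get_hori_cell_gradients : Prop := ∀ (cell_grid : List (List Int)) (h_ : Int) (w : Int), Dom_get_hori_cell_gradients cell_grid h_ w → Pre_get_hori_cell_gradients cell_grid h_ w → Spec_get_hori_cell_gradients cell_grid h_ w (get_hori_cell_gradients cell_grid h_ w)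

-- ===== LEMMAS AND PROOFS =====

def pvRow2 (cg : List (List Int)) (w i : Int) : List Int :=
  (PySem.List.pyRange 0 w 1).map (fun j => pvCell cg i j + pvCell cg (i+1) j)

def pvRow3 (cg : List (List Int)) (w i : Int) : List Int :=
  (PySem.List.pyRange 0 w 1).map (fun j => (pvCell cg i j + pvCell cg (i+1) j) + pvCell cg (i+2) j)

-- prefix column sum: sum of cg[k][j] for 0 ≤ k < i
def pvPrefS (cg : List (List Int)) (i j : Int) : Int :=
  ((PySem.List.pyRange 0 i 1).map (fun k => pvCell cg k j)).sum

def pvPrefRow (cg : List (List Int)) (w i : Int) : List Int :=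
  (PySem.List.pyRange 0 w 1).map (fun j => pvPrefS cg i j)

-- ---- A-side characterisation ----

theorem pv_inner_some (cg : List (List Int)) (i : Int) (l : List Int) (a b : List Int) :
    l.foldl (fun st j =>
        let sum_2 := pvCell cg i j + pvCell cg (i+1) j
        (st.1 ++ [sum_2],
         match st.2 with
         | some g3 => some (g3 ++ [sum_2 + pvCell cg (i+2) j])
         | none => none)) (a, some b)
    = (a ++ l.map (fun j => pvCell cg i j + pvCell cg (i+1) j),
       some (b ++ l.map (fun j => (pvCell cg i j + pvCell cg (i+1) j) + pvCell cg (i+2) j))) := by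
  induction l generalizing a b with
  | nil => simp
  | cons x xs ih => simp [List.foldl_cons, ih]

theorem pv_inner_none (cg : List (List Int)) (i : Int) (l : List Int) (a : List Int) :
    l.foldl (fun st j =>
        let sum_2 := pvCell cg i j + pvCell cg (i+1) j
        (st.1 ++ [sum_2],
         match st.2 with
         | some g3 => some (g3 ++ [sum_2 + pvCell cg (i+2) j])
         | none => none)) (a, (none : Option (List Int)))
    = (a ++ l.map (fun j => pvCell cg i j + pvCell cg (i+1) j), (none : Option (List Int))) := by
  induction l generalizing a with
  | nil => simp
  | cons x xs ih => simp [List.foldl_cons, ih]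

theorem pv_outer_prefix (cg : List (List Int)) (h_ w : Int) (l : List Int)
    (hl : ∀ i ∈ l, i < h_ - 2) (a b : List (List Int)) :
    l.foldl (fun acc i =>
      let st := (PySem.List.pyRange 0 w 1).foldl (fun st j =>
          let sum_2 := pvCell cg i j + pvCell cg (i+1) j
          (st.1 ++ [sum_2],
           match st.2 with
           | some g3 => some (g3 ++ [sum_2 + pvCell cg (i+2) j])
           | none => none))
        (([] : List Int), if i < h_ - 2 then some ([] : List Int) else none)
      (acc.1 ++ [st.1],
       match st.2 with
       | some g3 => acc.2 ++ [g3]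
       | none => acc.2)) (a, b)
    = (a ++ l.map (pvRow2 cg w), b ++ l.map (pvRow3 cg w)) := by
  induction l generalizing a b with
  | nil => simp
  | cons x xs ih =>
    have hx : x < h_ - 2 := hl x (List.mem_cons_self ..)
    simp only [List.foldl_cons, if_pos hx, pv_inner_some, List.nil_append]
    rw [ih (fun i hi => hl i (List.mem_cons_of_mem _ hi))]
    simp [pvRow2, pvRow3]

theorem pv_A_eq (cg : List (List Int)) (h_ w : Int) :
    get_hori_cell_gradients cg h_ w
      = ((PySem.List.pyRange 0 (h_ - 1) 1).map (pvRow2 cg w),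
         (PySem.List.pyRange 0 (h_ - 2) 1).map (pvRow3 cg w)) := by
  unfold get_hori_cell_gradients
  by_cases h2 : 0 ≤ h_ - 2
  · have hsplit1 : PySem.List.pyRange 0 (h_ - 2 + 1) 1
        = PySem.List.pyRange 0 (h_ - 2) 1 ++ [h_ - 2] := by
      have := PySem.List.pyRange_one_succ_right h2
      simpa using this
    have hm1 : h_ - 1 = h_ - 2 + 1 := by omega
    rw [hsplit1, List.foldl_append,
        pv_outer_prefix cg h_ w (PySem.List.pyRange 0 (h_ - 2) 1) (by intro i hi; exact (PySem.List.mem_pyRange_one.mp hi).2) [] []]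
    simp only [List.foldl_cons, List.foldl_nil, if_neg (lt_irrefl (h_ - 2)), pv_inner_none]
    rw [hm1, hsplit1]
    simp [pvRow2]
  · have e1 : PySem.List.pyRange 0 (h_ - 2 + 1) 1 = [] :=
      PySem.List.pyRange_one_eq_nil (by omega)
    have e2 : PySem.List.pyRange 0 (h_ - 1) 1 = [] :=
      PySem.List.pyRange_one_eq_nil (by omega)
    have e3 : PySem.List.pyRange 0 (h_ - 2) 1 = [] :=
      PySem.List.pyRange_one_eq_nil (by omega)
    simp [e1, e2, e3]

-- ---- B-side: the prefix fold is a scanl, and the scanl is the table of pvPrefRow ----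

theorem pv_fold_scanl (g : List Int → List Int → List Int)
    (rs : List (List Int)) (init : List (List Int)) (a : List Int) :
    rs.foldl (fun pref row => pref ++ [g (PySem.List.pyGetD pref (-1) ([] : List Int)) row])
        (init ++ [a])
      = init ++ List.scanl g a rs := by
  induction rs generalizing init a with
  | nil => simp [List.scanl]
  | cons r rs ih =>
    simp only [List.foldl_cons, PySem.List.pyGetD_neg_one_append_singleton]
    rw [show (init ++ [a]) ++ [g a r] = (init ++ [a]) ++ [g a r] from rfl, ih]
    simp [List.scanl]

theorem pv_step (cg : List (List Int)) (w i : Int) (r : List Int) (hi : 0 ≤ i)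
    (hlen : i.toNat < cg.length) (hr : r = cg[i.toNat]'hlen) (hw : w ≤ (r.length : Int)) :
    List.zipWith (· + ·) (pvPrefRow cg w i) r = pvPrefRow cg w (i + 1) := by
  apply List.ext_getElem
  · simp [pvPrefRow, PySem.List.length_pyRange_one]
    omega
  · intro k h1 h2
    have hkw : (k : Int) < w := by
      simp [List.length_zipWith, pvPrefRow, PySem.List.length_pyRange_one] at h1
      omega
    have hkr : k < r.length := by omega
    simp only [List.getElem_zipWith, pvPrefRow, List.getElem_map,
      PySem.List.getElem_pyRange_one, zero_add]
    have hilen : i < (cg.length : Int) := by omega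
    have hcell : pvCell cg i (k : Int) = r[k]'hkr := by
      unfold pvCell
      rw [PySem.List.pyGetD_eq_getElem cg [] hi hilen, ← hr,
          PySem.List.pyGetD_eq_getElem r 0 (by positivity) (by exact_mod_cast hkr)]
      simp
    have hrec : pvPrefS cg (i + 1) (k : Int) = pvPrefS cg i (k : Int) + pvCell cg i (k : Int) := by
      unfold pvPrefS
      rw [PySem.List.pyRange_one_succ_right hi]
      simp
    rw [hrec, hcell]

theorem pv_scanl_table (cg : List (List Int)) (w : Int) (rs : List (List Int)) :
    ∀ (s : Int), 0 ≤ s →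
    (∀ k (hk : k < rs.length), ∃ hc : (s + (k : Int)).toNat < cg.length,
        rs[k] = cg[(s + (k : Int)).toNat]'hc ∧ w ≤ ((rs[k]).length : Int)) →
    List.scanl (fun p row => List.zipWith (· + ·) p row) (pvPrefRow cg w s) rs
      = (PySem.List.pyRange s (s + rs.length + 1) 1).map (pvPrefRow cg w) := by
  induction rs with
  | nil =>
    intro s hs _
    simp [List.scanl, PySem.List.pyRange_one_singleton]
  | cons r rs ih =>
    intro s hs hk
    obtain ⟨hc0, hr0, hw0⟩ := hk 0 (by simp)
    simp only [List.getElem_cons_zero] at hr0 hw0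
    have hs0 : (s + ((0:Nat) : Int)).toNat = s.toNat := by omega
    have hc0' : s.toNat < cg.length := by omega
    have hr0' : r = cg[s.toNat]'hc0' := by rw [hr0]; congr 1
    have hstep := pv_step cg w s r hs hc0' hr0' hw0
    have hrest : List.scanl (fun p row => List.zipWith (· + ·) p row) (pvPrefRow cg w (s+1)) rs
        = (PySem.List.pyRange (s+1) ((s+1) + rs.length + 1) 1).map (pvPrefRow cg w) := by
      apply ih (s+1) (by omega)
      intro k hk'
      obtain ⟨hc, he, hw'⟩ := hk (k+1) (by simpa using Nat.succ_lt_succ hk')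
      have harith : (s + ((k+1 : Nat) : Int)).toNat = ((s+1) + (k : Int)).toNat := by
        push_cast; omega
      refine ⟨by omega, ?_, ?_⟩
      · simp only [List.getElem_cons_succ] at he
        rw [he]; congr 1
      · simpa using hw'
    have hb : s + (((r :: rs).length : Nat) : Int) + 1 = (s+1) + rs.length + 1 := by
      push_cast [List.length_cons]; omega
    rw [List.scanl_cons, hstep, hb, PySem.List.pyRange_one_cons (by omega)]
    simp [hrest]

theorem pv_prefS_succ (cg : List (List Int)) (j : Int) (m : Int) (hm : 0 ≤ m) :
    pvPrefS cg (m + 1) j = pvPrefS cg m j + pvCell cg m j := by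
  unfold pvPrefS
  rw [PySem.List.pyRange_one_succ_right hm]
  simp

theorem pv_B_main (cg : List (List Int)) (h_ w : Int) (h2 : 2 ≤ h_) (_hw : 1 ≤ w)
    (hlen : h_ ≤ (cg.length : Int)) (hrows : ∀ r ∈ cg.take h_.toNat, w ≤ (r.length : Int)) :
    get_hori_cell_gradients_alt cg h_ w
      = ((PySem.List.pyRange 0 (h_ - 1) 1).map (pvRow2 cg w),
         (PySem.List.pyRange 0 (h_ - 2) 1).map (pvRow3 cg w)) := by
  have h0 : (0:Int) ≤ h_ := by omega
  have hlen' : (cg.take h_.toNat).length = h_.toNat := by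
    simp [List.length_take]
    omega
  have hinit : List.replicate w.toNat 0 = pvPrefRow cg w 0 := by
    simp [pvPrefRow, pvPrefS, PySem.List.pyRange_one_eq_nil (le_refl (0:Int)),
          List.map_const', PySem.List.length_pyRange_one]
  have htab : List.scanl (fun p row => List.zipWith (· + ·) p row) (pvPrefRow cg w 0) (cg.take h_.toNat)
      = (PySem.List.pyRange 0 (h_ + 1) 1).map (pvPrefRow cg w) := by
    have hyp : ∀ k (hk : k < (cg.take h_.toNat).length), ∃ hc : ((0:Int) + (k : Int)).toNat < cg.length,
        (cg.take h_.toNat)[k] = cg[((0:Int) + (k : Int)).toNat]'hc ∧ w ≤ (((cg.take h_.toNat)[k]).length : Int) := by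
      intro k hk
      have hk' : k < h_.toNat := by omega
      have hidx : ((0:Int) + (k : Int)).toNat = k := by omega
      refine ⟨by omega, ?_, ?_⟩
      · simp [List.getElem_take]
      · exact hrows _ (List.getElem_mem _)
    have hthis := pv_scanl_table cg w (cg.take h_.toNat) 0 le_rfl hyp
    have hb : (0:Int) + (((cg.take h_.toNat).length : Nat) : Int) + 1 = h_ + 1 := by
      rw [hlen']
      omega
    rw [hb] at hthis
    exact hthis
  have hpref : (PySem.List.slice cg none (some h_)).foldl
      (fun pref row => pref ++ [List.zipWith (· + ·) (PySem.List.pyGetD pref (-1) ([] : List Int)) row])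
      [List.replicate w.toNat 0]
      = (PySem.List.pyRange 0 (h_ + 1) 1).map (pvPrefRow cg w) := by
    rw [PySem.List.slice_to cg h0, hinit,
        show [pvPrefRow cg w 0] = [] ++ [pvPrefRow cg w 0] from rfl,
        pv_fold_scanl, List.nil_append, htab]
  simp only [get_hori_cell_gradients_alt, if_neg (by omega : ¬ h_ < 2), hpref]
  refine Prod.ext ?_ ?_
  · apply List.map_congr_left
    intro i hi
    obtain ⟨hi0, hi1⟩ := PySem.List.mem_pyRange_one.mp hi
    rw [PySem.List.pyGetD_map_pyRange_of_nonneg (pvPrefRow cg w) (h_+1) (i+2) [] (by omega) (by omega),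
        PySem.List.pyGetD_map_pyRange_of_nonneg (pvPrefRow cg w) (h_+1) i [] (by omega) (by omega)]
    unfold pvRow2
    simp only [pvPrefRow]
    apply List.map_congr_left
    intro j hj
    obtain ⟨hj0, hj1⟩ := PySem.List.mem_pyRange_one.mp hj
    rw [PySem.List.pyGetD_map_pyRange_of_nonneg (fun j => pvPrefS cg (i+2) j) w j 0 hj0 hj1,
        PySem.List.pyGetD_map_pyRange_of_nonneg (fun j => pvPrefS cg i j) w j 0 hj0 hj1]
    rw [show (i:Int) + 2 = i + 1 + 1 by omega, pv_prefS_succ cg j (i+1) (by omega),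
        pv_prefS_succ cg j i (by omega)]
    ring_nf
  · apply List.map_congr_left
    intro i hi
    obtain ⟨hi0, hi1⟩ := PySem.List.mem_pyRange_one.mp hi
    rw [PySem.List.pyGetD_map_pyRange_of_nonneg (pvPrefRow cg w) (h_+1) (i+3) [] (by omega) (by omega),
        PySem.List.pyGetD_map_pyRange_of_nonneg (pvPrefRow cg w) (h_+1) i [] (by omega) (by omega)]
    unfold pvRow3
    simp only [pvPrefRow]
    apply List.map_congr_left
    intro j hj
    obtain ⟨hj0, hj1⟩ := PySem.List.mem_pyRange_one.mp hj
    rw [PySem.List.pyGetD_map_pyRange_of_nonneg (fun j => pvPrefS cg (i+3) j) w j 0 hj0 hj1,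
        PySem.List.pyGetD_map_pyRange_of_nonneg (fun j => pvPrefS cg i j) w j 0 hj0 hj1]
    rw [show (i:Int) + 3 = i + 1 + 1 + 1 by omega, pv_prefS_succ cg j (i+1+1) (by omega),
        pv_prefS_succ cg j (i+1) (by omega), pv_prefS_succ cg j i (by omega)]
    ring_nf

-- ===== VERDICT (by name: the statement is the Claim_ definition above) =====
theorem get_hori_cell_gradients_spec : Claim_equal_get_hori_cell_gradients := by
  intro cg h_ w _dom pre
  unfold Spec_get_hori_cell_gradients
  rw [pv_A_eq]
  by_cases hh : h_ ≤ 1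
  · have e1 : PySem.List.pyRange 0 (h_ - 1) 1 = [] := PySem.List.pyRange_one_eq_nil (by omega)
    have e2 : PySem.List.pyRange 0 (h_ - 2) 1 = [] := PySem.List.pyRange_one_eq_nil (by omega)
    simp [get_hori_cell_gradients_alt, show h_ < 2 by omega, e1, e2]
  · by_cases hw : w ≤ 0
    · have ew : PySem.List.pyRange 0 w 1 = [] := PySem.List.pyRange_one_eq_nil hw
      have m2 : (PySem.List.pyRange 0 (h_-1) 1).map (pvRow2 cg w)
          = (PySem.List.pyRange 0 (h_-1) 1).map (fun _ => ([] : List Int)) :=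
        List.map_congr_left (fun i _ => by simp [pvRow2, ew])
      have m3 : (PySem.List.pyRange 0 (h_-2) 1).map (pvRow3 cg w)
          = (PySem.List.pyRange 0 (h_-2) 1).map (fun _ => ([] : List Int)) :=
        List.map_congr_left (fun i _ => by simp [pvRow3, ew])
      simp [get_hori_cell_gradients_alt, ew, m2, m3]
      omega
    · rcases pre with h | h | ⟨hlen, hrows⟩
      · omega
      · omega
      · exact (pv_B_main cg h_ w (by omega) (by omega) hlen hrows).symm
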